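-- pv_equiv track=rewrite | github.com/Nanazuzu/PythonLearn | 2025_06_12/2025_06_12(2).py | reverse_words_with_tags
-- ===== SOURCE A (Python) =====
-- def reverse_words_with_tags(s: str) -> str:
--   is_tag = False
--   ret = []
--   mid = []
--   for index in s:
--     if index == '<':
--       is_tag = True
--       if len(mid) != 0:
--         ret.append(''.join(mid))
--         mid.clear()
--       mid.append('<')
--       continue
--     elif index == '>':
--       is_tag = False
--       mid.append('>')
--       ret.append(''.join(mid))
--       mid.clear()
--       continue
--     if index == ' ':
--       mid.append(' ')
--       ret.append(''.join(mid))
--       mid.clear()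
--       continue
--     if is_tag:
--       mid.append(index)
--     elif not is_tag:
--       mid.insert(0, index) #IT CAN BE ret.append(''.join(mid[::-1]))
--   if len(mid) != 0:
--     ret.append(''.join(mid))
--   return ''.join(ret)
-- ===== SOURCE B (Python) =====
-- def reverse_words_with_tags(s: str) -> str:
--   # Tokenize-then-transform: one pass over tokens (tag / stray '>' or ' ' / word),
--   # reversing only word tokens, instead of a char-by-char state machine.
--   out = []
--   i, n = 0, len(s)
--   while i < n:
--     c = s[i]
--     if c == '<':
--       j = s.find('>', i)
--       j = n - 1 if j == -1 else j
--       out.append(s[i:j + 1])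
--       i = j + 1
--     elif c == '>' or c == ' ':
--       out.append(c)
--       i += 1
--     else:
--       j = i
--       while j < n and s[j] not in '<> ':
--         j += 1
--       out.append(s[i:j][::-1])
--       i = j
--   return ''.join(out)
-- ===== Notes on version B (the rewrite author's own statement) =====
-- stated objective: faster
-- what changed: Replaced A's char-by-char state machine (is_tag flag, mid buffer built by insert(0,..)) with a tokenize-then-transform scan that slices out whole tag/word tokens and reverses only word tokens.
import Mathlib
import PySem

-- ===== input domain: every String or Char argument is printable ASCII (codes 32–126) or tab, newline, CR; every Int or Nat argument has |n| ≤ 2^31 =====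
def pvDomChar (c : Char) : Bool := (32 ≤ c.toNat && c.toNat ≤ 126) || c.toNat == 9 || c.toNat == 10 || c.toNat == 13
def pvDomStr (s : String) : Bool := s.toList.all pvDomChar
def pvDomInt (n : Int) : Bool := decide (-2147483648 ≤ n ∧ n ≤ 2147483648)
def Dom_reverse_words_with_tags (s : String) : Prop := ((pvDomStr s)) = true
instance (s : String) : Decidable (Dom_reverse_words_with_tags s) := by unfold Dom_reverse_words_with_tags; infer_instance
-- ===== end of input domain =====

-- B replaces A's char-by-char state machine by a tokenize-then-transform pass
-- (tag / stray '>' or space / word tokens, only word tokens reversed); objective: faster (A builds each word with insert(0, c)).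

-- ===== PORT A =====
-- state = (is_tag, ret, mid); ''.join is modelled by List Char concatenation
def aStep : (Bool × List (List Char) × List Char) → Char → (Bool × List (List Char) × List Char)
  | (is_tag, ret, mid), c =>
    if c = '<' then
      (true, (if mid.length ≠ 0 then ret ++ [mid] else ret), ['<'])
    else if c = '>' then
      (false, ret ++ [mid ++ ['>']], [])
    else if c = ' ' then
      (is_tag, ret ++ [mid ++ [' ']], [])
    else if is_tag then
      (is_tag, ret, mid ++ [c])
    else
      (is_tag, ret, c :: mid)   -- mid.insert(0, index)

def reverse_words_with_tags (s : String) : String :=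
  let st := s.toList.foldl aStep (false, [], [])
  let ret := if st.2.2.length ≠ 0 then st.2.1 ++ [st.2.2] else st.2.1
  String.ofList ret.flatten

-- ===== PORT B =====
def bWordChar (c : Char) : Bool := c ≠ '<' && c ≠ '>' && c ≠ ' '

-- tokenizer: tag token (to first '>' or end), single stray '>'/' ', or reversed word
def altGo : List Char → List Char
  | [] => []
  | c :: rest =>
    if c = '<' then
      -- s.find('>', i): split the remainder at the first '>'
      match h : rest.dropWhile (· ≠ '>') with
      | [] => c :: rest.takeWhile (· ≠ '>')
      | g :: tl => c :: rest.takeWhile (· ≠ '>') ++ [g] ++ altGo tl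
    else if c = '>' ∨ c = ' ' then
      c :: altGo rest
    else
      (List.takeWhile bWordChar (c :: rest)).reverse ++ altGo (List.dropWhile bWordChar (c :: rest))
termination_by l => l.length
decreasing_by
  · have := List.length_dropWhile_le (p := fun x => decide (x ≠ '>')) rest
    rw [h] at this; simp at this ⊢; omega
  · simp
  · rename_i h1 h2
    have : List.dropWhile bWordChar (c :: rest) = List.dropWhile bWordChar rest := by
      have hw : bWordChar c = true := by
        push_neg at h2; simp [bWordChar, h1, h2.1, h2.2]
      simp [hw]
    rw [this]
    have := List.length_dropWhile_le (p := bWordChar) rest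
    simp; omega

def reverse_words_with_tags_alt (s : String) : String := String.ofList (altGo s.toList)

-- ===== PRECONDITION & SPEC =====
def Spec_reverse_words_with_tags (s : String) (out : String) : Prop := out = reverse_words_with_tags_alt s
instance (s : String) (out : String) : Decidable (Spec_reverse_words_with_tags s out) := by unfold Spec_reverse_words_with_tags; infer_instance

-- ===== CLAIM (what is proved, stated in full; the proofs are below) =====
def Claim_equal_reverse_words_with_tags : Prop := ∀ (s : String), Dom_reverse_words_with_tags s → Spec_reverse_words_with_tags s (reverse_words_with_tags s)

-- ===== LEMMAS AND PROOFS =====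

-- A's machine, written as structural recursion (mode × input × pending mid ↦ emitted output)
def spec : Bool → List Char → List Char → List Char
  | _, [], mid => mid
  | true, c :: tl, mid =>
    if c = '<' then mid ++ spec true tl ['<']
    else if c = '>' then mid ++ '>' :: spec false tl []
    else if c = ' ' then mid ++ ' ' :: spec true tl []
    else spec true tl (mid ++ [c])
  | false, c :: tl, mid =>
    if c = '<' then mid ++ spec true tl ['<']
    else if c = '>' then mid ++ '>' :: spec false tl []
    else if c = ' ' then mid ++ ' ' :: spec false tl []
    else spec false tl (c :: mid)

def aOut (st : Bool × List (List Char) × List Char) : List Char :=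
  (if st.2.2.length ≠ 0 then st.2.1 ++ [st.2.2] else st.2.1).flatten

theorem aOut_eq (st : Bool × List (List Char) × List Char) :
    aOut st = st.2.1.flatten ++ st.2.2 := by
  unfold aOut; split <;> simp_all

theorem foldl_aStep_eq (l : List Char) : ∀ (tag : Bool) (ret : List (List Char)) (mid : List Char),
    aOut (l.foldl aStep (tag, ret, mid)) = ret.flatten ++ spec tag l mid := by
  induction l with
  | nil => intro tag ret mid; simp [aOut_eq, spec]
  | cons c tl ih =>
    intro tag ret mid
    by_cases h1 : c = '<'
    · subst h1
      cases tag <;> simp only [List.foldl_cons, aStep, if_pos rfl, spec, ih] <;>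
        split <;> simp_all <;> split <;> simp_all
    · by_cases h2 : c = '>'
      · subst h2
        cases tag <;> simp_all [aStep, spec, ih]
      · by_cases h3 : c = ' '
        · subst h3
          cases tag <;> simp_all [aStep, spec, ih]
        · cases tag <;> simp_all [aStep, spec, ih]

-- head of dropWhile falsifies the predicate
theorem dropWhile_head_false {p : Char → Bool} : ∀ (l : List Char) (g : Char) (tl : List Char),
    l.dropWhile p = g :: tl → p g = false := by
  intro l
  induction l with
  | nil => intro g tl h; simp at h
  | cons a as ih =>
    intro g tl h
    rw [List.dropWhile_cons] at h
    by_cases hp : p a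
    · exact ih g tl (by simpa [hp] using h)
    · simp [hp] at h
      rw [← h.1]; simpa using hp

theorem altGo_nil : altGo [] = [] := by
  rw [altGo.eq_def]

theorem altGo_word (l : List Char) :
    altGo l = (l.takeWhile bWordChar).reverse ++ altGo (l.dropWhile bWordChar) := by
  cases l with
  | nil => simp
  | cons c rest =>
    by_cases h1 : c = '<'
    · have hw : bWordChar c = false := by simp [bWordChar, h1]
      simp [List.takeWhile_cons, List.dropWhile_cons, hw]
    · by_cases h2 : c = '>' ∨ c = ' '
      · have hw : bWordChar c = false := by rcases h2 with h | h <;> simp [bWordChar, h]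
        simp [List.takeWhile_cons, List.dropWhile_cons, hw]
      · rw [altGo.eq_def]; simp [h1, h2]

-- tag mode: verbatim copy up to the first '>', then back to B's main loop
theorem spec_true_eq : ∀ (l : List Char) (mid : List Char),
    spec true l mid = mid ++ l.takeWhile (· ≠ '>') ++
      (match l.dropWhile (· ≠ '>') with
       | [] => []
       | _ :: tl => '>' :: spec false tl []) := by
  intro l
  induction l with
  | nil => intro mid; simp [spec]
  | cons c tl ih =>
    intro mid
    by_cases h2 : c = '>'
    · subst h2; simp [spec, List.takeWhile_cons, List.dropWhile_cons]
    · have htk : (c :: tl).takeWhile (· ≠ '>') = c :: tl.takeWhile (· ≠ '>') := by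
        simp [List.takeWhile_cons, h2]
      have hdr : (c :: tl).dropWhile (· ≠ '>') = tl.dropWhile (· ≠ '>') := by
        simp [List.dropWhile_cons, h2]
      rw [htk, hdr]
      by_cases h1 : c = '<'
      · subst h1; simp [spec, ih]
      · by_cases h3 : c = ' '
        · subst h3; simp [spec, ih]
        · simp [spec, h1, h2, h3, ih]

theorem spec_false_eq : ∀ (l : List Char) (mid : List Char),
    spec false l mid = (l.takeWhile bWordChar).reverse ++ mid ++ altGo (l.dropWhile bWordChar) := by
  have main : ∀ (n : Nat) (l : List Char), l.length ≤ n → ∀ (mid : List Char),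
      spec false l mid = (l.takeWhile bWordChar).reverse ++ mid ++ altGo (l.dropWhile bWordChar) := by
    intro n
    induction n with
    | zero =>
      intro l hl mid
      have : l = [] := by cases l <;> simp_all
      subst this; simp [spec, altGo_nil]
    | succ n ih =>
      intro l hl
      cases l with
      | nil => intro mid; simp [spec, altGo_nil]
      | cons c tl =>
      intro mid
      by_cases h1 : c = '<'
      · subst h1
        have htk : List.takeWhile bWordChar ('<' :: tl) = [] := by
          simp [List.takeWhile_cons, bWordChar]
        have hdw : List.dropWhile bWordChar ('<' :: tl) = '<' :: tl := by
          simp [List.dropWhile_cons, bWordChar]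
        rw [spec, if_pos rfl, spec_true_eq, htk, hdw]
        simp only [List.reverse_nil, List.nil_append]
        rw [altGo.eq_def]
        simp only [reduceIte]
        cases hdrop : tl.dropWhile (· ≠ '>') with
        | nil =>
          simp only [hdrop]
          simp
        | cons g tl2 =>
          have hg : g = '>' := by
            have := dropWhile_head_false tl g tl2 hdrop; simpa using this
          have hlen : tl2.length ≤ n := by
            have := List.length_dropWhile_le (p := fun x => decide (x ≠ '>')) tl
            rw [hdrop] at this; simp at this hl; omega
          have halt : spec false tl2 [] = altGo tl2 := by
            rw [ih tl2 hlen []]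
            conv_rhs => rw [altGo_word tl2]
            simp
          simp only [hdrop]
          simp [hg, halt]
      · by_cases h2 : c = '>' ∨ c = ' '
        · have hw : bWordChar c = false := by rcases h2 with h | h <;> simp [bWordChar, h]
          have htk : List.takeWhile bWordChar (c :: tl) = [] := by
            simp [hw]
          have hdw : List.dropWhile bWordChar (c :: tl) = c :: tl := by
            simp [hw]
          have halt : spec false tl [] = altGo tl := by
            rw [ih tl (by simp at hl; omega) []]
            conv_rhs => rw [altGo_word tl]
            simp
          rw [htk, hdw]
          simp only [List.reverse_nil, List.nil_append]
          rw [altGo.eq_def]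
          rcases h2 with h | h <;> subst h <;> simp [spec, halt]
        · push_neg at h2
          have hw : bWordChar c = true := by simp [bWordChar, h1, h2.1, h2.2]
          have htk : List.takeWhile bWordChar (c :: tl) = c :: List.takeWhile bWordChar tl := by
            simp [hw]
          have hdw : List.dropWhile bWordChar (c :: tl) = List.dropWhile bWordChar tl := by
            simp [hw]
          rw [htk, hdw, spec]
          simp only [if_neg h1, if_neg h2.1, if_neg h2.2]
          rw [ih tl (by simp at hl; omega) (c :: mid)]
          simp
  intro l mid
  exact main l.length l le_rfl mid

-- ===== VERDICT (by name: the statement is the Claim_ definition above) =====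
theorem reverse_words_with_tags_spec : Claim_equal_reverse_words_with_tags := by
  intro s _
  unfold Spec_reverse_words_with_tags reverse_words_with_tags reverse_words_with_tags_alt
  have key : aOut (List.foldl aStep (false, [], []) s.toList) = altGo s.toList := by
    rw [foldl_aStep_eq, spec_false_eq]
    simp only [List.flatten_nil, List.nil_append, List.append_nil]
    exact (altGo_word s.toList).symm
  show String.ofList (aOut (List.foldl aStep (false, [], []) s.toList)) = String.ofList (altGo s.toList)
  rw [key]
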